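-- pv_equiv track=rewrite | github.com/SungOh98/Algorithm | Binary Search/BOJ. 24887 최대한의 휴식/24887.py | parametric_search
-- ===== SOURCE A (Python) =====
-- def is_possible(arr, x, n, task):
--     dp = [arr[:]]
--     dp.append([0] * (n + 1))
--     for i in range(1, n + 1):
--         if i - x - 1 >= 0:
--             dp[0][i] = max(dp[0][i - x - 1], dp[1][i - x - 1]) + dp[0][i]
--
--         dp[1][i] = max(dp[0][i - 1], dp[1][i - 1])
--     return max(dp[0][n], dp[1][n]) >= task
--
-- def parametric_search(arr, task, n):
--     start, end = 0, 2 * int(1e5)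
--
--     while start <= end:
--         mid = (start + end) // 2
--         if is_possible(arr, mid, n, task):
--             start = mid + 1
--
--         else:
--             end = mid - 1
--     return (start + end) // 2
-- ===== SOURCE B (Python) =====
-- def parametric_search(arr, task, n):
--     # One-array DP: f[i] = best score using days 0..i = max(dp[0][i], dp[1][i]) of A.
--     def rest_ok(x):
--         f = [max(arr[0], 0)]
--         for i in range(1, n + 1):
--             take = arr[i] + (f[i - x - 1] if i - x - 1 >= 0 else 0)
--             f.append(max(f[-1], take))
--         return f[n] >= task
--
--     def search(lo, hi):
--         if lo > hi:
--             return (lo + hi) // 2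
--         mid = (lo + hi) // 2
--         if rest_ok(mid):
--             return search(mid + 1, hi)
--         return search(lo, mid - 1)
--
--     return search(0, 200000)
-- ===== Notes on version B (the rewrite author's own statement) =====
-- stated objective: simpler
-- what changed: The feasibility check's two mutated DP rows (best-ending-here and best-so-far) are collapsed into a single append-only running-max array f with f[i] = max(f[i-1], arr[i] + f[i-x-1]), and the outer while-loop binary search is restated as a recursive search function.
import Mathlib
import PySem

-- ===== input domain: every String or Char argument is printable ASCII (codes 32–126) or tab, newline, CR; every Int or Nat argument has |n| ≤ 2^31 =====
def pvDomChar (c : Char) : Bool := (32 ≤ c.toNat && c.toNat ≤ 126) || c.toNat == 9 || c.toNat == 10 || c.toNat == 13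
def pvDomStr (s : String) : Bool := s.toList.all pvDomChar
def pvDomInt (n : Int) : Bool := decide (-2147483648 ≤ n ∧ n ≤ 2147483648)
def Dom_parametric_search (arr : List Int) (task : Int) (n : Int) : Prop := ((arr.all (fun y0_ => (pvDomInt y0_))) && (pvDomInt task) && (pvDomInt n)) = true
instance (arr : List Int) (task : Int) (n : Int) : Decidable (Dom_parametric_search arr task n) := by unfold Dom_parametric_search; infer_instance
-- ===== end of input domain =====

-- B collapses A's two mutated DP rows into one append-only running-max array and makes the
-- binary search recursive; objective: simpler. Equal return value on Pre_ (A raises outside it).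


-- ===== PORT A =====
-- is_possible: dp = [arr[:], [0]*(n+1)]; for i in range(1, n+1): mutate dp[0][i], dp[1][i].
-- List mutation 'dp[r][i] = v' is PySem.List.pySetD; reads are PySem.List.pyGetD (exact in range,
-- which Pre_parametric_search guarantees).
def is_possible (arr : List Int) (x : Int) (n : Int) (task : Int) : Bool :=
  let init : List Int × List Int := (arr, List.replicate (n + 1).toNat (0 : Int))
  let st := (PySem.List.pyRange 1 (n + 1) 1).foldl
    (fun (s : List Int × List Int) i =>
      let d0 :=
        if i - x - 1 ≥ 0 then
          PySem.List.pySetD s.1 i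
            (max (PySem.List.pyGetD s.1 (i - x - 1) 0) (PySem.List.pyGetD s.2 (i - x - 1) 0)
              + PySem.List.pyGetD s.1 i 0)
        else s.1
      let d1 := PySem.List.pySetD s.2 i
        (max (PySem.List.pyGetD d0 (i - 1) 0) (PySem.List.pyGetD s.2 (i - 1) 0))
      (d0, d1)) init
  decide (max (PySem.List.pyGetD st.1 n 0) (PySem.List.pyGetD st.2 n 0) ≥ task)

-- the while-loop of parametric_search, state (start, end)
def loopA (arr : List Int) (task : Int) (n : Int) (start e : Int) : Int :=
  if h : start ≤ e then
    let mid := PySem.Int.floordiv (start + e) 2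
    if is_possible arr mid n task then loopA arr task n (mid + 1) e
    else loopA arr task n start (mid - 1)
  else PySem.Int.floordiv (start + e) 2
termination_by (e - start + 1).toNat
decreasing_by
  · have := PySem.Int.floordiv_two_mid_bounds h; omega
  · have := PySem.Int.floordiv_two_mid_bounds h; omega

-- 2 * int(1e5) is the integer literal 200000
def parametric_search (arr : List Int) (task : Int) (n : Int) : Int :=
  loopA arr task n 0 (2 * 100000)

-- ===== PORT B =====
-- rest_ok: f = [max(arr[0], 0)]; for i: f.append(max(f[-1], arr[i] + (f[i-x-1] if ... else 0)))
def restOk (arr : List Int) (x : Int) (n : Int) (task : Int) : Bool :=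
  let f := (PySem.List.pyRange 1 (n + 1) 1).foldl
    (fun (f : List Int) i =>
      let take := PySem.List.pyGetD arr i 0 +
        (if i - x - 1 ≥ 0 then PySem.List.pyGetD f (i - x - 1) 0 else 0)
      f ++ [max (PySem.List.pyGetD f (-1) 0) take])
    [max (PySem.List.pyGetD arr 0 0) 0]
  decide (PySem.List.pyGetD f n 0 ≥ task)

def searchB (arr : List Int) (task : Int) (n : Int) (lo hi : Int) : Int :=
  if h : lo > hi then PySem.Int.floordiv (lo + hi) 2
  else
    let mid := PySem.Int.floordiv (lo + hi) 2
    if restOk arr mid n task then searchB arr task n (mid + 1) hi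
    else searchB arr task n lo (mid - 1)
termination_by (hi - lo + 1).toNat
decreasing_by
  · have := PySem.Int.floordiv_two_mid_bounds (by omega : lo ≤ hi); omega
  · have := PySem.Int.floordiv_two_mid_bounds (by omega : lo ≤ hi); omega

def parametric_search_alt (arr : List Int) (task : Int) (n : Int) : Int :=
  searchB arr task n 0 200000

-- ===== PRECONDITION & SPEC =====
-- Pre_ excludes exactly the inputs where A raises IndexError: n < 0 (dp[1] is empty and dp[1][n]
-- is read), or arr shorter than n+1 (dp[0][i] is read for i up to n).
def Pre_parametric_search (arr : List Int) (task : Int) (n : Int) : Prop :=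
  0 ≤ n ∧ n + 1 ≤ (arr.length : Int)
instance (arr : List Int) (task : Int) (n : Int) : Decidable (Pre_parametric_search arr task n) := by
  unfold Pre_parametric_search; infer_instance

def pvWitness_parametric_search : List Int × Int × Int := ([3, -1, 4], 5, 2)

def Spec_parametric_search (arr : List Int) (task : Int) (n : Int) (out : Int) : Prop := out = parametric_search_alt arr task n
instance (arr : List Int) (task : Int) (n : Int) (out : Int) : Decidable (Spec_parametric_search arr task n out) := by unfold Spec_parametric_search; infer_instance

-- ===== CLAIM (what is proved, stated in full; the proofs are below) =====
def Claim_equal_parametric_search : Prop := ∀ (arr : List Int) (task : Int) (n : Int), Dom_parametric_search arr task n → Pre_parametric_search arr task n → Spec_parametric_search arr task n (parametric_search arr task n)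

-- ===== LEMMAS AND PROOFS =====

-- Ghost value of A's two DP rows at index i (for rest-gap x): (dp[0][i], dp[1][i]) after the loop.
def ghost (arr : List Int) (x : Nat) : Nat → Int × Int
  | 0 => (arr.getD 0 0, 0)
  | (i + 1) =>
      ((if x ≤ i then arr.getD (i + 1) 0 + max (ghost arr x (i - x)).1 (ghost arr x (i - x)).2
        else arr.getD (i + 1) 0),
       max (ghost arr x i).1 (ghost arr x i).2)
termination_by i => i
decreasing_by all_goals omega

-- Ghost value of B's array f at index i.
def fghost (arr : List Int) (x : Nat) : Nat → Int
  | 0 => max (arr.getD 0 0) 0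
  | (i + 1) => max (fghost arr x i)
      (arr.getD (i + 1) 0 + (if x ≤ i then fghost arr x (i - x) else 0))
termination_by i => i
decreasing_by all_goals omega

theorem fghost_eq_max_ghost (arr : List Int) (x : Nat) :
    ∀ i : Nat, fghost arr x i = max (ghost arr x i).1 (ghost arr x i).2 := by
  intro i
  induction i using Nat.strong_induction_on with
  | _ i ih =>
    match i with
    | 0 => simp [fghost, ghost]
    | (j + 1) =>
      rw [fghost, ghost]
      rw [ih j (by omega)]
      by_cases hx : x ≤ j
      · rw [if_pos hx, if_pos hx, ih (j - x) (by omega)]; omega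
      · rw [if_neg hx, if_neg hx]; omega

-- getD after set, at and off the written index (used for A's row mutations)
theorem getD_set_ne (xs : List Int) (k m : Nat) (v : Int) (h : k ≠ m) :
    (xs.set m v).getD k 0 = xs.getD k 0 := by
  simp [List.getD_eq_getElem?_getD, List.getElem?_set_ne (Ne.symm h)]

theorem getD_set_self (xs : List Int) (m : Nat) (v : Int) (h : m < xs.length) :
    (xs.set m v).getD m 0 = v := by
  simp [List.getD_eq_getElem?_getD, h]

theorem getD_map_range (g : Nat → Int) (m k : Nat) (h : k < m) :
    ((List.range m).map g).getD k 0 = g k := by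
  simp [List.getD_eq_getElem?_getD, h]

-- B's loop builds exactly the list of fghost values
theorem foldB_eq (arr : List Int) (X : Nat) (m : Nat) :
    ((PySem.List.pyRange 1 ((m : Int) + 1) 1).foldl
      (fun (f : List Int) i =>
        let take := PySem.List.pyGetD arr i 0 +
          (if i - (X : Int) - 1 ≥ 0 then PySem.List.pyGetD f (i - (X : Int) - 1) 0 else 0)
        f ++ [max (PySem.List.pyGetD f (-1) 0) take])
      [max (PySem.List.pyGetD arr 0 0) 0])
    = (List.range (m + 1)).map (fghost arr X) := by
  induction m with
  | zero =>
    rw [PySem.List.pyRange_one_eq_nil (by omega)]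
    simp [fghost, PySem.List.pyGetD_zero, List.getD_eq_getElem?_getD]
  | succ m ih =>
    rw [show (((m + 1 : Nat)) : Int) + 1 = ((m : Int) + 1) + 1 by push_cast; ring,
        PySem.List.pyRange_one_succ_right (by omega), List.foldl_append, ih]
    simp only [List.foldl_cons, List.foldl_nil]
    have hlast : PySem.List.pyGetD ((List.range (m + 1)).map (fghost arr X)) (-1) 0
        = fghost arr X m := by
      rw [List.range_succ, List.map_append]
      exact PySem.List.pyGetD_neg_one_append_singleton _ _ _
    have harr : PySem.List.pyGetD arr ((m : Int) + 1) 0 = arr.getD (m + 1) 0 := by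
      rw [show ((m : Int) + 1) = ((m + 1 : Nat) : Int) by push_cast; ring,
          PySem.List.pyGetD_natCast]
    rw [hlast, harr]
    have hf : fghost arr X (m + 1) = max (fghost arr X m)
        (arr.getD (m + 1) 0 + (if X ≤ m then fghost arr X (m - X) else 0)) := by
      rw [fghost]
    by_cases hx : X ≤ m
    · rw [if_pos (by omega)]
      have hidx : (m : Int) + 1 - (X : Int) - 1 = ((m - X : Nat) : Int) := by
        omega
      rw [hidx, PySem.List.pyGetD_natCast, getD_map_range _ _ _ (by omega)]
      rw [List.range_succ (n := m + 1), List.map_append]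
      simp only [List.map_cons, List.map_nil]
      rw [hf, if_pos hx]
    · rw [if_neg (by omega)]
      rw [List.range_succ (n := m + 1), List.map_append]
      simp only [List.map_cons, List.map_nil]
      rw [hf, if_neg hx]

-- A's loop state after the first m iterations: lengths preserved, entries up to m are the ghost
-- DP values, entries of row 0 beyond m are still the original arr entries
theorem foldA_inv (arr : List Int) (X N : Nat) (hlen : N + 1 ≤ arr.length) :
    ∀ m : Nat, m ≤ N →
    (((PySem.List.pyRange 1 ((m : Int) + 1) 1).foldl
      (fun (s : List Int × List Int) i =>
        let d0 :=
          if i - (X : Int) - 1 ≥ 0 then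
            PySem.List.pySetD s.1 i
              (max (PySem.List.pyGetD s.1 (i - (X : Int) - 1) 0) (PySem.List.pyGetD s.2 (i - (X : Int) - 1) 0)
                + PySem.List.pyGetD s.1 i 0)
          else s.1
        let d1 := PySem.List.pySetD s.2 i
          (max (PySem.List.pyGetD d0 (i - 1) 0) (PySem.List.pyGetD s.2 (i - 1) 0))
        (d0, d1)) ((arr, List.replicate (N + 1) (0 : Int)) : List Int × List Int)) |>
      (fun st => st.1.length = arr.length ∧ st.2.length = N + 1 ∧
        (∀ j : Nat, j ≤ m → st.1.getD j 0 = (ghost arr X j).1 ∧ st.2.getD j 0 = (ghost arr X j).2) ∧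
        (∀ j : Nat, m < j → st.1.getD j 0 = arr.getD j 0))) := by
  intro m
  induction m with
  | zero =>
    intro _
    rw [PySem.List.pyRange_one_eq_nil (by omega)]
    refine ⟨rfl, by simp, ?_, fun j _ => rfl⟩
    intro j hj
    interval_cases j
    constructor
    · simp [ghost]
    · simp [ghost, List.getD_eq_getElem?_getD]
  | succ m ih =>
    intro hm
    obtain ⟨h1, h2, h3, h4⟩ := ih (by omega)
    rw [show (((m + 1 : Nat)) : Int) + 1 = ((m : Int) + 1) + 1 by push_cast; ring,
        PySem.List.pyRange_one_succ_right (by omega), List.foldl_append]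
    simp only [List.foldl_cons, List.foldl_nil]
    set st := (PySem.List.pyRange 1 ((m : Int) + 1) 1).foldl _ _ with hst
    have hcast : ((m : Int) + 1) = ((m + 1 : Nat) : Int) := by omega
    -- the new row 0
    have hd0 : ∀ d0 : List Int,
        (d0 = if (m : Int) + 1 - (X : Int) - 1 ≥ 0 then
            PySem.List.pySetD st.1 ((m : Int) + 1)
              (max (PySem.List.pyGetD st.1 ((m : Int) + 1 - (X : Int) - 1) 0)
                   (PySem.List.pyGetD st.2 ((m : Int) + 1 - (X : Int) - 1) 0)
                + PySem.List.pyGetD st.1 ((m : Int) + 1) 0)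
          else st.1) →
        d0.length = arr.length ∧ d0.getD (m + 1) 0 = (ghost arr X (m + 1)).1 ∧
          (∀ j : Nat, j ≤ m → d0.getD j 0 = st.1.getD j 0) ∧
          (∀ j : Nat, m + 1 < j → d0.getD j 0 = arr.getD j 0) := by
      intro d0 hd0def
      by_cases hx : X ≤ m
      · rw [if_pos (by omega)] at hd0def
        have hidx : (m : Int) + 1 - (X : Int) - 1 = ((m - X : Nat) : Int) := by omega
        rw [hidx, hcast] at hd0def
        simp only [PySem.List.pyGetD_natCast, PySem.List.pySetD_natCast] at hd0def
        obtain ⟨hA, hB⟩ := h3 (m - X) (by omega)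
        have hup : (m : Nat) + 1 > m := by omega
        rw [hA, hB, h4 (m + 1) (by omega)] at hd0def
        subst hd0def
        refine ⟨by simp [h1], ?_, ?_, ?_⟩
        · rw [getD_set_self _ _ _ (by omega), ghost, if_pos hx]
          ring
        · intro j hj; exact getD_set_ne _ _ _ _ (by omega)
        · intro j hj; rw [getD_set_ne _ _ _ _ (by omega)]; exact h4 j (by omega)
      · rw [if_neg (by omega)] at hd0def
        subst hd0def
        refine ⟨h1, ?_, fun j _ => rfl, fun j hj => h4 j (by omega)⟩
        rw [h4 (m + 1) (by omega), ghost, if_neg hx]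
    obtain ⟨hl0, hg0, hkeep, hhigh⟩ := hd0 _ rfl
    set d0 := if (m : Int) + 1 - (X : Int) - 1 ≥ 0 then _ else st.1 with hd0def
    -- the new row 1
    have hmid : (m : Int) + 1 - 1 = ((m : Nat) : Int) := by ring
    refine ⟨hl0, ?_, ?_, hhigh⟩
    · rw [hcast, PySem.List.pySetD_natCast]; simp [h2]
    · intro j hj
      rcases Nat.lt_or_ge j (m + 1) with hj' | hj'
      · obtain ⟨hA, hB⟩ := h3 j (by omega)
        refine ⟨by rw [hkeep j (by omega)]; exact hA, ?_⟩
        rw [hcast, PySem.List.pySetD_natCast, getD_set_ne _ _ _ _ (by omega)]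
        exact hB
      · have hj2 : j = m + 1 := by omega
        subst hj2
        refine ⟨hg0, ?_⟩
        rw [hmid, hcast, PySem.List.pySetD_natCast,
            getD_set_self _ _ _ (by omega), PySem.List.pyGetD_natCast, PySem.List.pyGetD_natCast]
        obtain ⟨hA, hB⟩ := h3 m (by omega)
        rw [hkeep m (by omega), hA, hB, ghost]

-- the feasibility checks agree for every nonnegative rest gap
theorem inner_eq (arr : List Int) (task n x : Int) (hn : 0 ≤ n)
    (hlen : n + 1 ≤ (arr.length : Int)) (hx : 0 ≤ x) :
    is_possible arr x n task = restOk arr x n task := by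
  obtain ⟨N, rfl⟩ : ∃ N : Nat, n = (N : Int) := ⟨n.toNat, (Int.toNat_of_nonneg hn).symm⟩
  obtain ⟨X, rfl⟩ : ∃ X : Nat, x = (X : Int) := ⟨x.toNat, (Int.toNat_of_nonneg hx).symm⟩
  have hlen' : N + 1 ≤ arr.length := by exact_mod_cast hlen
  unfold is_possible restOk
  simp only []
  have hrep : ((N : Int) + 1).toNat = N + 1 := by omega
  rw [hrep]
  obtain ⟨h1, h2, h3, h4⟩ := foldA_inv arr X N hlen' N (le_refl N)
  obtain ⟨hA, hB⟩ := h3 N (le_refl N)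
  rw [foldB_eq arr X N]
  simp only [PySem.List.pyGetD_natCast] at *
  rw [hA, hB, getD_map_range _ _ _ (by omega), fghost_eq_max_ghost]

-- binary searches agree step for step once the feasibility checks do
theorem loop_eq (arr : List Int) (task n : Int)
    (hinner : ∀ x : Int, 0 ≤ x → is_possible arr x n task = restOk arr x n task) :
    ∀ lo hi : Int, 0 ≤ lo → loopA arr task n lo hi = searchB arr task n lo hi := by
  intro lo hi hlo
  rw [loopA, searchB]
  by_cases h : lo ≤ hi
  · have hm := PySem.Int.floordiv_two_mid_bounds h
    rw [dif_pos h, dif_neg (by omega)]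
    simp only []
    rw [hinner _ (by omega)]
    by_cases hp : restOk arr (PySem.Int.floordiv (lo + hi) 2) n task
    · rw [if_pos hp, if_pos hp]
      exact loop_eq arr task n hinner _ _ (by omega)
    · rw [if_neg hp, if_neg hp]
      exact loop_eq arr task n hinner _ _ (by omega)
  · rw [dif_neg h, dif_pos (by omega)]
termination_by lo hi _ => (hi - lo + 1).toNat
decreasing_by
  · have := PySem.Int.floordiv_two_mid_bounds h; omega
  · have := PySem.Int.floordiv_two_mid_bounds h; omega

-- ===== VERDICT (by name: the statement is the Claim_ definition above) =====
theorem parametric_search_spec : Claim_equal_parametric_search := by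
  intro arr task n _ hpre
  obtain ⟨hn, hlen⟩ := hpre
  unfold Spec_parametric_search parametric_search parametric_search_alt
  rw [show (2 * 100000 : Int) = 200000 by norm_num]
  exact loop_eq arr task n (fun x hx => inner_eq arr task n x hn hlen hx) 0 200000 (by omega)
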